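-- pv_equiv track=rewrite | github.com/jKaleba/ASD | Offline Quests/StrongString/zad3.py | czolg
-- ===== SOURCE A (Python) =====
-- def czolg(A):
--     n = len(A)
--     maxC = 0
--     for i in range(n - 1):
--         c = 1
--         for j in range(i + 1, n):
--             if A[i] == A[j] or A[i] == A[j][::-1]:
--                 c += 1
--         if c > maxC:
--             maxC = c
--
--     return maxC
-- ===== SOURCE B (Python) =====
-- def czolg(A):
--     if len(A) < 2:
--         return 0
--     cnt = {}
--     for s in A:
--         k = min(s, s[::-1])
--         cnt[k] = cnt.get(k, 0) + 1
--     return max(cnt.values())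
-- ===== Notes on version B (the rewrite author's own statement) =====
-- stated objective: faster
-- what changed: Replaces the O(n^2) all-pairs comparison (each string against every later string and its reverse) by a single pass that buckets strings under the canonical key min(s, s[::-1]) in a dict and returns the largest bucket count (0 when fewer than two strings, as A does).
import Mathlib
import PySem

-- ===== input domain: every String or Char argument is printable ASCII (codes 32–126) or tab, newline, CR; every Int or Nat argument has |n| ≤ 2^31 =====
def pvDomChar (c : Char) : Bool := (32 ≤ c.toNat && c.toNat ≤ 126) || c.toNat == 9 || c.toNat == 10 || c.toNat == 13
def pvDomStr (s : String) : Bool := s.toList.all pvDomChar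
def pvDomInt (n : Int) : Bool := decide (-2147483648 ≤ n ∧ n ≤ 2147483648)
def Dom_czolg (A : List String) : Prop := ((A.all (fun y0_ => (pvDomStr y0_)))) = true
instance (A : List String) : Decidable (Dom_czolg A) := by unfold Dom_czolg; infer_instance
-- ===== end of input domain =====

-- B replaces A's quadratic pairwise scan by one counting pass over the canonical key
-- min(s, s[::-1]) and returns the largest bucket size (0 for fewer than two strings, as A does).

-- ===== PORT A =====
def czolg (A : List String) : Int :=
  let n := PySem.List.len A
  (PySem.List.pyRange 0 (n - 1) 1).foldl (fun maxC i =>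
    let c : Int := (PySem.List.pyRange (i + 1) n 1).foldl (fun c j =>
      -- A[i] / A[j]: both indices are always in range here, so the total pyGetD form is exact;
      -- A[j][::-1]: slice? with step -1 never returns none, so .getD "" is exact
      if PySem.List.pyGetD A i "" = PySem.List.pyGetD A j "" ∨
         PySem.List.pyGetD A i "" = (PySem.Str.slice? (PySem.List.pyGetD A j "") none none (-1)).getD ""
      then c + 1 else c) 1
    if c > maxC then c else maxC) 0

-- ===== PORT B =====
def czolg_alt (A : List String) : Int :=
  if PySem.List.len A < 2 then 0
  else
    let cnt : PySem.Dict String Int := A.foldl (fun d s =>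
      let r := (PySem.Str.slice? s none none (-1)).getD ""   -- s[::-1]; never none for step -1
      -- min(s, r) = s if s <= r else r, i.e. r if r < s else s (Python's lexicographic <)
      let k := if PySem.Chars.strLt r.toList s.toList then r else s
      d.insert k (d.getD k 0 + 1)) PySem.Dict.empty
    -- max(cnt.values()): cnt is nonempty here since len A ≥ 2, so Python's max returns
    (PySem.List.max? cnt.values (fun v => v)).getD 0

-- ===== PRECONDITION & SPEC =====
def Spec_czolg (A : List String) (out : Int) : Prop := out = czolg_alt A
instance (A : List String) (out : Int) : Decidable (Spec_czolg A out) := by unfold Spec_czolg; infer_instance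

-- ===== CLAIM (what is proved, stated in full; the proofs are below) =====
def Claim_equal_czolg : Prop := ∀ (A : List String), Dom_czolg A → Spec_czolg A (czolg A)

-- ===== LEMMAS AND PROOFS =====

-- s[::-1] as a plain function, and the canonical key min(s, s[::-1])
def pvRev (s : String) : String := String.ofList s.toList.reverse
def pvKey (s : String) : String := if PySem.Chars.strLt (pvRev s).toList s.toList then pvRev s else s
def pvKeys (A : List String) : List String := A.map pvKey
-- the inner-loop count of A's iteration i, expressed over the canonical keys
def pvC (A : List String) (i : Nat) : Int :=
  1 + (((pvKeys A).drop (i + 1)).count ((pvKeys A).getD i ""))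

theorem pvRev_rev (s : String) : pvRev (pvRev s) = s := by simp [pvRev]

theorem rev_slice (t : String) : (PySem.Str.slice? t none none (-1)).getD "" = pvRev t := by
  simp [PySem.Str.slice?_none_none_neg_one, pvRev]

theorem pvKey_cases (s : String) : pvKey s = s ∨ pvKey s = pvRev s := by
  unfold pvKey; split_ifs <;> simp

theorem pvKey_rev (t : String) : pvKey (pvRev t) = pvKey t := by
  unfold pvKey
  rw [pvRev_rev]
  rcases lt_trichotomy t.toList (pvRev t).toList with h | h | h
  · rw [if_pos (by simp [PySem.Chars.strLt]; exact h),
      if_neg (by simp [PySem.Chars.strLt]; exact h.le)]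
  · have ht : t = pvRev t := String.toList_inj.mp h
    rw [← ht]
  · rw [if_neg (by simp [PySem.Chars.strLt]; exact h.le),
      if_pos (by simp [PySem.Chars.strLt]; exact h)]

-- A's pair test is exactly equality of canonical keys
theorem pvKey_match (s t : String) : (s = t ∨ s = pvRev t) ↔ pvKey s = pvKey t := by
  constructor
  · rintro (rfl | rfl)
    · rfl
    · exact pvKey_rev t
  · intro h
    rcases pvKey_cases s with hs | hs <;> rcases pvKey_cases t with ht | ht <;>
      rw [hs, ht] at h
    · exact Or.inl h
    · exact Or.inr h
    · right; rw [← h, pvRev_rev]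
    · left; have := congrArg pvRev h; rwa [pvRev_rev, pvRev_rev] at this

-- A's nested loops are a running max of the per-index counts pvC
theorem czolg_eq_fold (A : List String) :
    czolg A = ((List.range (A.length - 1)).map (pvC A)).foldl max 0 := by
  unfold czolg
  simp only [PySem.List.len_eq]
  rw [PySem.List.pyRange_one 0 ((A.length : Int) - 1)]
  rw [List.foldl_map, List.foldl_map]
  have hlen : (((A.length : Int) - 1) - 0).toNat = A.length - 1 := by omega
  rw [hlen]
  apply PySem.List.foldl_congr_mem
  intro maxC k hk
  rw [List.mem_range] at hk
  have hkA : k < A.length := by omega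
  simp only [zero_add]
  rw [PySem.List.foldl_pyRange_pyGetD' A ""
        (fun c t => if PySem.List.pyGetD A (k : Int) "" = t ∨
            PySem.List.pyGetD A (k : Int) "" = (PySem.Str.slice? t none none (-1)).getD ""
          then c + 1 else c) 1 (by positivity)]
  have htn : ((k : Int) + 1).toNat = k + 1 := by omega
  rw [htn]
  have hfun : (fun (c : Int) t => if PySem.List.pyGetD A (k : Int) "" = t ∨
            PySem.List.pyGetD A (k : Int) "" = (PySem.Str.slice? t none none (-1)).getD ""
          then c + 1 else c)
      = (fun (c : Int) t => if (fun t => pvKey t == pvKey (PySem.List.pyGetD A (k : Int) "")) t = true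
          then c + 1 else c) := by
    funext c t
    rw [rev_slice]
    by_cases h : PySem.List.pyGetD A (k : Int) "" = t ∨ PySem.List.pyGetD A (k : Int) "" = pvRev t
    · rw [if_pos h, if_pos (beq_iff_eq.mpr ((pvKey_match _ t).mp h).symm)]
    · rw [if_neg h, if_neg (by simp only [beq_iff_eq]; intro hc; exact h ((pvKey_match _ t).mpr hc.symm))]
  rw [hfun, PySem.List.foldl_count_if]
  have hget : (A.map pvKey).getD k "" = pvKey (PySem.List.pyGetD A (k : Int) "") := by
    simp only [PySem.List.pyGetD_natCast]
    rw [List.getD_eq_getElem?_getD, List.getElem?_map, List.getD_eq_getElem?_getD,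
      List.getElem?_eq_getElem hkA]
    simp
  have hC : pvC A k = 1 + ((A.drop (k+1)).countP
      (fun t => pvKey t == pvKey (PySem.List.pyGetD A (k : Int) ""))) := by
    simp only [pvC, pvKeys]
    rw [hget, List.count_eq_countP, ← List.map_drop, List.countP_map]
    rfl
  rw [hC]
  split_ifs <;> omega

-- B is the max over distinct canonical keys of their multiplicities
theorem czolg_alt_eq (A : List String) (h : 2 ≤ A.length) :
    czolg_alt A =
      (PySem.List.max? ((PySem.Set.ofList (pvKeys A)).map
        (fun k => ((pvKeys A).count k : Int))) (fun v => v)).getD 0 := by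
  unfold czolg_alt
  rw [if_neg (by simp only [PySem.List.len_eq]; omega)]
  have hbody : (fun (d : PySem.Dict String Int) s =>
      let r := (PySem.Str.slice? s none none (-1)).getD ""
      let k := if PySem.Chars.strLt r.toList s.toList then r else s
      d.insert k (d.getD k 0 + 1))
      = (fun (d : PySem.Dict String Int) s => d.insert (pvKey s) (d.getD (pvKey s) 0 + 1)) := by
    funext d s
    show (let r := (PySem.Str.slice? s none none (-1)).getD ""
      let k := if PySem.Chars.strLt r.toList s.toList then r else s
      d.insert k (d.getD k 0 + 1)) = _
    rw [rev_slice]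
    rfl
  rw [hbody]
  show ((PySem.List.max? (List.foldl (fun (d : PySem.Dict String Int) s =>
      d.insert (pvKey s) (d.getD (pvKey s) 0 + 1)) PySem.Dict.empty A).values fun v => v).getD 0) = _
  rw [← List.foldl_map (f := pvKey)
      (g := fun (d : PySem.Dict String Int) k => d.insert k (d.getD k 0 + 1)),
    PySem.Dict.foldl_insert_getD_add_one_eq_counter]
  show ((PySem.List.max? ((PySem.Dict.counter (pvKeys A)).items.map (·.2)) fun v => v).getD 0) = _
  rw [PySem.Dict.items_counter, List.map_map]
  rfl

-- each inner count is at most the full multiplicity of its key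
theorem pvC_le_count (A : List String) (i : Nat) (hi : i < A.length) :
    pvC A i ≤ (((pvKeys A).count ((pvKeys A).getD i "")) : Int) := by
  have hlen : (pvKeys A).length = A.length := by simp [pvKeys]
  have hi' : i < (pvKeys A).length := by omega
  have hk : (pvKeys A)[i] = (pvKeys A).getD i "" := by
    simp [List.getD_eq_getElem?_getD, List.getElem?_eq_getElem hi']
  have hmem : (pvKeys A).getD i "" ∈ (pvKeys A).take (i+1) := by
    have h2 : ((pvKeys A).take (i+1))[i]'(by simp; omega) = (pvKeys A)[i] := List.getElem_take
    rw [hk] at h2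
    exact h2 ▸ List.getElem_mem _
  have h1 : 1 ≤ ((pvKeys A).take (i+1)).count ((pvKeys A).getD i "") :=
    List.one_le_count_iff.mpr hmem
  have hca : ∀ kk : String, (pvKeys A).count kk
      = ((pvKeys A).take (i+1)).count kk + ((pvKeys A).drop (i+1)).count kk := by
    intro kk
    conv_lhs => rw [← List.take_append_drop (i+1) (pvKeys A)]
    rw [List.count_append]
  have hca := hca ((pvKeys A).getD i "")
  unfold pvC
  omega

-- at a key's first occurrence the inner count is the full multiplicity
theorem pvC_first (A : List String) (k : String) (hk : k ∈ pvKeys A) :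
    pvC A ((pvKeys A).idxOf k) = ((pvKeys A).count k : Int) := by
  have hi : (pvKeys A).idxOf k < (pvKeys A).length := List.idxOf_lt_length_of_mem hk
  have hgi : (pvKeys A)[(pvKeys A).idxOf k] = k := List.getElem_idxOf hi
  have hnot : k ∉ (pvKeys A).take ((pvKeys A).idxOf k) := by
    rw [List.mem_take_iff_idxOf_lt hk]
    omega
  have htake : (pvKeys A).count k = ((pvKeys A).take ((pvKeys A).idxOf k)).count k
      + ((pvKeys A).drop ((pvKeys A).idxOf k)).count k := by
    conv_lhs => rw [← List.take_append_drop ((pvKeys A).idxOf k) (pvKeys A)]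
    rw [List.count_append]
  have hzero : ((pvKeys A).take ((pvKeys A).idxOf k)).count k = 0 := List.count_eq_zero.mpr hnot
  have hdrop : (pvKeys A).drop ((pvKeys A).idxOf k) = k :: (pvKeys A).drop ((pvKeys A).idxOf k + 1) := by
    rw [List.drop_eq_getElem_cons hi, hgi]
  have hgd : (pvKeys A).getD ((pvKeys A).idxOf k) "" = k := by
    simp [List.getD_eq_getElem?_getD, List.getElem?_eq_getElem hi, hgi]
  unfold pvC
  rw [hgd, htake, hzero, hdrop, List.count_cons_self]
  omega

-- ===== VERDICT (by name: the statement is the Claim_ definition above) =====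
theorem czolg_spec : Claim_equal_czolg := by
  intro A _
  unfold Spec_czolg
  by_cases h2 : 2 ≤ A.length
  · rw [czolg_eq_fold, czolg_alt_eq A h2]
    have hlen : (pvKeys A).length = A.length := by simp [pvKeys]
    obtain ⟨v, vt, hv⟩ : ∃ v vt, (PySem.Set.ofList (pvKeys A)).map
        (fun k => ((pvKeys A).count k : Int)) = v :: vt := by
      cases hks : pvKeys A with
      | nil => rw [hks] at hlen; simp at hlen; omega
      | cons a t => exact ⟨_, _, by rw [PySem.Set.ofList_cons]; rfl⟩
    rw [hv, PySem.List.max?_id_cons, Option.getD_some]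
    have hvmem : ∀ x ∈ v :: vt, x ≤ vt.foldl max v := by
      intro x hx
      rcases List.mem_cons.mp hx with rfl | hx
      · exact (PySem.List.le_foldl_max vt x).1
      · exact (PySem.List.le_foldl_max vt v).2 x hx
    have hfold := PySem.List.le_foldl_max ((List.range (A.length - 1)).map (pvC A)) 0
    apply le_antisymm
    · rcases PySem.List.foldl_max_mem ((List.range (A.length - 1)).map (pvC A)) 0 with h0 | hmem
      · rw [h0]
        have hvpos : 0 ≤ v := by
          have hvm : v ∈ v :: vt := List.mem_cons_self ..
          rw [← hv] at hvm
          obtain ⟨kk, -, hkv⟩ := List.mem_map.mp hvm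
          rw [← hkv]; positivity
        exact le_trans hvpos (hvmem v (List.mem_cons_self ..))
      · obtain ⟨i, hir, hieq⟩ := List.mem_map.mp hmem
        rw [List.mem_range] at hir
        rw [← hieq]
        have hiA : i < A.length := by omega
        have hle := pvC_le_count A i hiA
        have hi' : i < (pvKeys A).length := by omega
        have hmemk : (pvKeys A).getD i "" ∈ PySem.Set.ofList (pvKeys A) := by
          rw [PySem.Set.mem_ofList]
          rw [List.getD_eq_getElem?_getD, List.getElem?_eq_getElem hi']
          exact List.getElem_mem _
        have hcm : (((pvKeys A).count ((pvKeys A).getD i "") : Int)) ∈ v :: vt := by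
          rw [← hv]; exact List.mem_map_of_mem hmemk
        exact le_trans hle (hvmem _ hcm)
    · have hBmem : vt.foldl max v ∈ v :: vt := by
        rcases PySem.List.foldl_max_mem vt v with hB | hB
        · rw [hB]; exact List.mem_cons_self ..
        · exact List.mem_cons_of_mem _ hB
      rw [← hv] at hBmem
      obtain ⟨k, hkS, hkv⟩ := List.mem_map.mp hBmem
      have hkmem : k ∈ pvKeys A := (PySem.Set.mem_ofList ..).mp hkS
      by_cases hc2 : 2 ≤ (pvKeys A).count k
      · have hfirst := pvC_first A k hkmem
        have hi : (pvKeys A).idxOf k < (pvKeys A).length := List.idxOf_lt_length_of_mem hkmem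
        have hidx : (pvKeys A).idxOf k < A.length - 1 := by
          by_contra hge
          have hdropnil : (pvKeys A).drop ((pvKeys A).idxOf k + 1) = [] := by
            apply List.drop_eq_nil_of_le; omega
          unfold pvC at hfirst
          rw [hdropnil] at hfirst
          simp at hfirst
          omega
        have hmm : pvC A ((pvKeys A).idxOf k) ∈ (List.range (A.length - 1)).map (pvC A) :=
          List.mem_map_of_mem (by rw [List.mem_range]; omega)
        have hb := hfold.2 _ hmm
        rw [hfirst] at hb
        rw [← hkv]
        exact hb
      · have hcount1 : (pvKeys A).count k = 1 := by
          have := List.one_le_count_iff.mpr hkmem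
          omega
        rw [← hkv, hcount1]
        have h0r : (0:Nat) ∈ List.range (A.length - 1) := by rw [List.mem_range]; omega
        have hmm : pvC A 0 ∈ (List.range (A.length - 1)).map (pvC A) := List.mem_map_of_mem h0r
        have hb := hfold.2 _ hmm
        have hp : (1:Int) ≤ pvC A 0 := by
          unfold pvC
          have : (0:Int) ≤ (((pvKeys A).drop 1).count ((pvKeys A).getD 0 "") : Int) := by positivity
          omega
        push_cast
        exact le_trans hp hb
  · rw [czolg_eq_fold]
    have hl : A.length - 1 = 0 := by omega
    rw [hl]
    unfold czolg_alt
    rw [if_pos (by simp only [PySem.List.len_eq]; omega)]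
    simp
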